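-- pv_equiv track=rewrite | github.com/esp0xdeadbeef/network-renderer-containerlab-linux-backend | clabgen/export.py | _render_links_endpoints_only
-- ===== SOURCE A (Python) =====
-- from typing import Any, Dict, List
--
-- def _render_links_endpoints_only(merged_links: List[Dict[str, Any]]) -> str:
--     lines: List[str] = ["  links:"]
--     for idx, link in enumerate(merged_links):
--         endpoints = link.get("endpoints", [])
--         lines.append("    - endpoints:")
--         for ep in endpoints:
--             lines.append(f"        - {ep}")
--         if idx != len(merged_links) - 1:
--             lines.append("")
--     return "\n".join(lines) + "\n"
-- ===== SOURCE B (Python) =====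
-- from typing import Any, Dict, List
--
-- def _render_links_endpoints_only(merged_links: List[Dict[str, Any]]) -> str:
--     def _suffix(links):
--         # render links back-to-front: build the tail's text first, then prepend this chunk
--         if not links:
--             return ""
--         head, tail = links[0], links[1:]
--         chunk = "    - endpoints:\n"
--         for ep in head.get("endpoints", []):
--             chunk += f"        - {ep}\n"
--         return chunk + ("\n" + _suffix(tail) if tail else "")
--     return "  links:\n" + _suffix(merged_links)
-- ===== Notes on version B (the rewrite author's own statement) =====
-- stated objective: alternative
-- what changed: B builds the output string recursively back-to-front with newline-terminated chunks (tail rendered first, then the current link's chunk prepended), never building a list of lines or calling join; A appends bare lines to a list with an index-lookahead blank-line branch and joins once at the end.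
import Mathlib
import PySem

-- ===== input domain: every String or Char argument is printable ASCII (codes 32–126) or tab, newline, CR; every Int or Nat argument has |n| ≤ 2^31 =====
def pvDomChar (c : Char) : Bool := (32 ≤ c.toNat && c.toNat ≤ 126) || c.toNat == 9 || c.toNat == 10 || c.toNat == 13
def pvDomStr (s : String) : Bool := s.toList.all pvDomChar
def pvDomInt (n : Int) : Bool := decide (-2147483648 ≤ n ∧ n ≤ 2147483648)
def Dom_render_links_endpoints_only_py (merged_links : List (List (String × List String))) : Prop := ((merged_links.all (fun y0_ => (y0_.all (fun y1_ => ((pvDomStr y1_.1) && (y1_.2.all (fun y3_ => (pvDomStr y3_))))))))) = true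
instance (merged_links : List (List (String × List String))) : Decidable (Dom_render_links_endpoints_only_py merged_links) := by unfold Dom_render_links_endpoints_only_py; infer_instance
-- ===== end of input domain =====

-- B builds the output recursively back-to-front from newline-terminated chunks (no line
-- list, no join), replacing A's line-accumulator loop with its idx-lookahead blank line;
-- objective: alternative decomposition, same cost.


-- ===== PORT A =====
def render_links_endpoints_only_py (merged_links : List (List (String × List String))) : String :=
  let lines : List String :=
    (PySem.List.enumerate merged_links).foldl (fun lines p =>
      let endpoints := (PySem.Dict.mk p.2).getD "endpoints" []
      let lines := lines ++ ["    - endpoints:"]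
      let lines := endpoints.foldl (fun ls ep => ls ++ ["        - " ++ ep]) lines
      if p.1 ≠ (merged_links.length : Int) - 1 then lines ++ [""] else lines)
      ["  links:"]
  PySem.Str.join "\n" lines ++ "\n"

-- ===== PORT B =====
-- helper `_suffix` of Source B: renders the links back-to-front, each line carrying its "\n"
def pvSuffix : List (List (String × List String)) → String
  | [] => ""
  | l :: ls =>
    let chunk := ((PySem.Dict.mk l).getD "endpoints" []).foldl
      (fun s ep => s ++ ("        - " ++ ep ++ "\n")) "    - endpoints:\n"
    chunk ++ (if ls ≠ [] then "\n" ++ pvSuffix ls else "")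

def render_links_endpoints_only_py_alt (merged_links : List (List (String × List String))) : String :=
  "  links:\n" ++ pvSuffix merged_links

-- ===== PRECONDITION & SPEC =====
def Spec_render_links_endpoints_only_py (merged_links : List (List (String × List String))) (out : String) : Prop := out = render_links_endpoints_only_py_alt merged_links
instance (merged_links : List (List (String × List String))) (out : String) : Decidable (Spec_render_links_endpoints_only_py merged_links out) := by unfold Spec_render_links_endpoints_only_py; infer_instance

-- ===== CLAIM (what is proved, stated in full; the proofs are below) =====
def Claim_equal_render_links_endpoints_only_py : Prop := ∀ (merged_links : List (List (String × List String))), Dom_render_links_endpoints_only_py merged_links → Spec_render_links_endpoints_only_py merged_links (render_links_endpoints_only_py merged_links)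

-- ===== LEMMAS AND PROOFS =====

-- the bare lines A emits for one link
def pvBlock (link : List (String × List String)) : List String :=
  "    - endpoints:" :: ((PySem.Dict.mk link).getD "endpoints" []).map (fun ep => "        - " ++ ep)

-- A's line list after the header: blocks separated by one "" line
def pvJoinBlank : List (List String) → List String
  | [] => []
  | [b] => b
  | b :: bs => b ++ ("" :: pvJoinBlank bs)

-- A's loop produces exactly the blank-separated blocks
theorem pvFoldA (L : Nat) (ls : List (List (String × List String))) (n : Nat)
    (hn : n + ls.length = L) (acc : List String) :
    (PySem.List.enumerate ls (n : Int)).foldl (fun lines p =>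
      let endpoints := (PySem.Dict.mk p.2).getD "endpoints" []
      let lines := lines ++ ["    - endpoints:"]
      let lines := endpoints.foldl (fun ls ep => ls ++ ["        - " ++ ep]) lines
      if p.1 ≠ (L : Int) - 1 then lines ++ [""] else lines) acc
    = acc ++ pvJoinBlank (ls.map pvBlock) := by
  induction ls generalizing n acc with
  | nil => simp [PySem.List.enumerate_nil, pvJoinBlank]
  | cons x xs ih =>
    rw [PySem.List.enumerate_cons]
    simp only [List.foldl_cons]
    rw [PySem.List.foldl_append_singleton_eq_map]
    cases xs with
    | nil =>
      have hL : (n : Int) = (L : Int) - 1 := by simp at hn; omega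
      simp only [hL, ne_eq, not_true_eq_false, if_false, ite_not]
      rw [PySem.List.enumerate_nil]
      simp [pvJoinBlank, pvBlock]
    | cons x' xs' =>
      have hL : (n : Int) ≠ (L : Int) - 1 := by simp at hn; omega
      simp only [hL, ne_eq, not_false_eq_true, if_pos]
      have : ((n : Int) + 1) = ((n + 1 : Nat) : Int) := by push_cast; ring
      rw [this, ih (n + 1) (by simp at hn ⊢; omega)]
      simp [pvJoinBlank, pvBlock]

theorem pvA_eq (ml : List (List (String × List String))) :
    render_links_endpoints_only_py ml
      = PySem.Str.join "\n" ("  links:" :: pvJoinBlank (ml.map pvBlock)) ++ "\n" := by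
  unfold render_links_endpoints_only_py
  have h := pvFoldA ml.length ml 0 (by simp) ["  links:"]
  simp only [Nat.cast_zero] at h
  rw [h]
  rfl

-- "\n"-join of a nonempty line list, plus the final "\n", = concat of newline-terminated lines
theorem pvJoinNl (a : List Char) (xs : List (List Char)) :
    PySem.Chars.join ['\n'] (a :: xs) ++ ['\n'] = ((a :: xs).map (· ++ ['\n'])).flatten := by
  induction xs generalizing a with
  | nil => simp [PySem.Chars.join_singleton]
  | cons b l ih =>
    rw [PySem.Chars.join_cons_cons]
    simp only [List.map_cons, List.flatten_cons] at ih ⊢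
    rw [List.append_assoc, List.append_assoc, ← ih b]
    simp

-- B's chunk foldl, unrolled
theorem pvChunk (eps : List String) (init : String) :
    (eps.foldl (fun s ep => s ++ ("        - " ++ ep ++ "\n")) init).toList
      = init.toList ++ (eps.map (fun ep => ("        - " ++ ep).toList ++ ['\n'])).flatten := by
  induction eps generalizing init with
  | nil => simp
  | cons e es ih => simp [ih, List.append_assoc]

-- B's back-to-front suffix = A's blank-separated blocks, each line newline-terminated
theorem pvSuffix_eq (ml : List (List (String × List String))) :
    (pvSuffix ml).toList
      = ((pvJoinBlank (ml.map pvBlock)).map (fun s => s.toList ++ ['\n'])).flatten := by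
  induction ml with
  | nil => simp [pvSuffix, pvJoinBlank]
  | cons l ls ih =>
    cases ls with
    | nil =>
      simp only [pvSuffix, List.map_cons, List.map_nil, pvJoinBlank]
      simp [pvChunk, pvBlock, List.map_map, Function.comp_def]
    | cons l' ls' =>
      have hblank : pvJoinBlank ((l :: l' :: ls').map pvBlock)
          = pvBlock l ++ ("" :: pvJoinBlank ((l' :: ls').map pvBlock)) := rfl
      have hstep : pvSuffix (l :: l' :: ls')
          = ((PySem.Dict.mk l).getD "endpoints" []).foldl
              (fun s ep => s ++ ("        - " ++ ep ++ "\n")) "    - endpoints:\n"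
            ++ ("\n" ++ pvSuffix (l' :: ls')) := rfl
      rw [hstep, hblank]
      simp [pvChunk, ih, pvBlock, List.map_map, Function.comp_def]

theorem pvAB_eq (ml : List (List (String × List String))) :
    render_links_endpoints_only_py ml = render_links_endpoints_only_py_alt ml := by
  rw [pvA_eq]
  unfold render_links_endpoints_only_py_alt
  apply String.toList_inj.mp
  have hjoin : ("\n" : String).toList = ['\n'] := rfl
  simp only [String.toList_append, PySem.Str.toList_join, hjoin, List.map_cons]
  rw [pvJoinNl]
  simp [pvSuffix_eq, List.map_map, Function.comp_def]

-- ===== VERDICT (by name: the statement is the Claim_ definition above) =====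
theorem render_links_endpoints_only_py_spec : Claim_equal_render_links_endpoints_only_py := by
  intro ml _
  unfold Spec_render_links_endpoints_only_py
  exact pvAB_eq ml
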